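-- pv_equiv track=rewrite | github.com/accurtis1/Advent-Of-Code | Day4.py | rule_two
-- ===== SOURCE A (Python) =====
-- def rule_two(num):
--     num = str(num)
--     doubles = []
--     last = num[:1]
--     passing = 1
--     for i in range(2, 7):
--         if num[i-1:i] == last:
--             doubles.append(last)
--         last = num[i-1:i]
--
--     if len(doubles) == 0:
--         return 0
--
--     for i in range(0, len(doubles)):
--         check = doubles.copy()
--         check.remove(check[i])
--         if doubles[i] in check:
--             passing = 0
--         elif doubles[i] not in check:
--             passing = 1
--             break
--
--     return passing
-- ===== SOURCE B (Python) =====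
-- def rule_two(num):
--     s = str(num)
--     pairs = [s[i-1:i] for i in range(2, 7) if s[i-1:i] == s[i-2:i-1]]
--     counts = {}
--     for p in pairs:
--         counts[p] = counts.get(p, 0) + 1
--     return 1 if any(c == 1 for c in counts.values()) else 0
-- ===== Notes on version B (the rewrite author's own statement) =====
-- stated objective: simpler
-- what changed: The quadratic copy/remove/inner-membership scan over the pair list is replaced by a single frequency-dict pass: return true exactly when some pair value occurs exactly once.
import Mathlib
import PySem

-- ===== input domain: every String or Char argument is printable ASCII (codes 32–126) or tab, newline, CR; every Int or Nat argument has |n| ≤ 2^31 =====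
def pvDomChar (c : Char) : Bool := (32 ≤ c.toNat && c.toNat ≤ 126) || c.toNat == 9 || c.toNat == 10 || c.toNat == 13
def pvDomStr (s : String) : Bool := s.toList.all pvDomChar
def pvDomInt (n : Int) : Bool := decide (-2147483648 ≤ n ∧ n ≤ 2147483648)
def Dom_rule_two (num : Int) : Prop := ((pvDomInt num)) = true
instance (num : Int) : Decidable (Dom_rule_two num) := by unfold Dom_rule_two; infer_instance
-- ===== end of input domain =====

-- B replaces A's quadratic copy/remove/membership scan with a single frequency-dict pass (objective: simpler).

-- ===== PORT A =====
-- first loop: doubles-accumulator and `last`, over range(2,7); slices on the code points of str(num)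
def ruleTwoScan (cs : List Char) : List (List Char) × List Char :=
  (PySem.List.pyRange 2 7 1).foldl
    (fun (st : List (List Char) × List Char) i =>
      let cur := PySem.List.slice cs (some (i - 1)) (some i)
      (if cur == st.2 then st.1 ++ [st.2] else st.1, cur))
    ([], PySem.List.slice cs none (some 1))

-- second loop: for i in range(0, len(doubles)); indices are always in range so getD [] never fires
def ruleTwoCheck (doubles : List (List Char)) : List Int → Int → Int
  | [], passing => passing
  | i :: rest, _passing =>
      let check := doubles
      let ci := (PySem.List.pyGet? check i).getD []
      let check' := (PySem.List.remove? check ci).getD []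
      if (PySem.List.pyGet? doubles i).getD [] ∈ check' then ruleTwoCheck doubles rest 0
      else 1

def rule_two (num : Int) : Int :=
  let cs := PySem.Int.toChars num
  let doubles := (ruleTwoScan cs).1
  if doubles.length == 0 then 0
  else ruleTwoCheck doubles (PySem.List.pyRange 0 (doubles.length) 1) 1

-- ===== PORT B =====
def rule_two_alt (num : Int) : Int :=
  let s := PySem.Int.toChars num
  let pairs := (PySem.List.pyRange 2 7 1).foldl
    (fun acc i =>
      if PySem.List.slice s (some (i - 1)) (some i)
           == PySem.List.slice s (some (i - 2)) (some (i - 1))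
      then acc ++ [PySem.List.slice s (some (i - 1)) (some i)] else acc) []
  let counts := pairs.foldl (fun d p => d.insert p (d.getD p 0 + 1)) PySem.Dict.empty
  if counts.values.any (fun c => c == (1 : Int)) then 1 else 0

-- ===== PRECONDITION & SPEC =====
def Spec_rule_two (num : Int) (out : Int) : Prop := out = rule_two_alt num
instance (num : Int) (out : Int) : Decidable (Spec_rule_two num out) := by unfold Spec_rule_two; infer_instance

-- ===== CLAIM (what is proved, stated in full; the proofs are below) =====
def Claim_equal_rule_two : Prop := ∀ (num : Int), Dom_rule_two num → Spec_rule_two num (rule_two num)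

-- ===== LEMMAS AND PROOFS =====


-- phase 1 agreement: A's doubles list equals B's pairs list
theorem scan_eq_pairs (cs : List Char) :
    (ruleTwoScan cs).1 =
      (PySem.List.pyRange 2 7 1).foldl
        (fun acc i =>
          if PySem.List.slice cs (some (i - 1)) (some i)
               == PySem.List.slice cs (some (i - 2)) (some (i - 1))
          then acc ++ [PySem.List.slice cs (some (i - 1)) (some i)] else acc) [] := by
  have h : PySem.List.pyRange 2 7 1 = [2,3,4,5,6] := by decide
  unfold ruleTwoScan
  rw [h]
  norm_num [List.foldl]
  split_ifs <;> simp_all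

-- A's second loop, generalized over the remaining index list
theorem check_gen (l : List (List Char)) (idxs : List Int) (passing : Int)
    (hv : ∀ i ∈ idxs, 0 ≤ i ∧ i < l.length) :
    ruleTwoCheck l idxs passing =
      if idxs.any (fun i => l.count ((PySem.List.pyGet? l i).getD []) == 1) then 1
      else if idxs = [] then passing else 0 := by
  induction idxs generalizing passing with
  | nil => simp [ruleTwoCheck]
  | cons i rest ih =>
    obtain ⟨h0, hlt⟩ := hv i (by simp)
    have hget : PySem.List.pyGet? l i = some l[i.toNat] :=
      PySem.List.pyGet?_eq_some_getElem l h0 (by omega)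
    have hmem : l[i.toNat] ∈ l := List.getElem_mem _
    have hrem : PySem.List.remove? l l[i.toNat] = some (l.erase l[i.toNat]) :=
      PySem.List.remove?_eq_some_erase l _ hmem
    have hcount : 0 < l.count l[i.toNat] := List.count_pos_iff.2 hmem
    have hmemerase : l[i.toNat] ∈ l.erase l[i.toNat] ↔ l.count l[i.toNat] ≠ 1 := by
      rw [← List.count_pos_iff, List.count_erase_self]
      omega
    simp only [ruleTwoCheck, hget, hrem, Option.getD_some]
    by_cases hc : l.count l[i.toNat] = 1
    · rw [if_neg (by rw [hmemerase]; omega)]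
      simp [List.any_cons, hget, hc]
    · rw [if_pos (hmemerase.2 hc)]
      rw [ih 0 (fun j hj => hv j (by simp [hj]))]
      simp only [List.any_cons, hget, Option.getD_some]
      have : (l.count l[i.toNat] == 1) = false := by simp [hc]
      rw [this, Bool.false_or]
      by_cases hr : rest.any (fun i => l.count ((PySem.List.pyGet? l i).getD []) == 1) = true
      · simp [hr]
      · simp only [Bool.not_eq_true] at hr
        simp [hr]

-- A's second loop decides "some element of l occurs exactly once"
theorem check_eq (l : List (List Char)) (hl : l ≠ []) :
    ruleTwoCheck l (PySem.List.pyRange 0 (l.length) 1) 1 =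
      if l.any (fun p => l.count p == 1) then 1 else 0 := by
  have hlen : 0 < l.length := List.length_pos_iff.2 hl
  rw [check_gen l _ 1 (fun i hi => by
    have := (PySem.List.mem_pyRange_one).1 hi
    exact ⟨this.1, this.2⟩)]
  have hne : PySem.List.pyRange 0 (l.length) 1 ≠ [] := by
    intro h
    have := congrArg List.length h
    rw [PySem.List.length_pyRange_one] at this
    simp only [List.length_nil] at this
    omega
  have hany : (PySem.List.pyRange 0 (l.length) 1).any
      (fun i => l.count ((PySem.List.pyGet? l i).getD []) == 1) =
      l.any (fun p => l.count p == 1) := by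
    rw [Bool.eq_iff_iff]
    simp only [List.any_eq_true]
    constructor
    · rintro ⟨i, hi, h⟩
      obtain ⟨h0, hlt⟩ := (PySem.List.mem_pyRange_one).1 hi
      rw [PySem.List.pyGet?_eq_some_getElem l h0 (by omega)] at h
      exact ⟨l[i.toNat], List.getElem_mem _, by simpa using h⟩
    · rintro ⟨p, hp, h⟩
      obtain ⟨k, hk, hkp⟩ := List.getElem_of_mem hp
      refine ⟨(k : Int), (PySem.List.mem_pyRange_one).2 ⟨by positivity, by exact_mod_cast hk⟩, ?_⟩
      rw [PySem.List.pyGet?_eq_some_getElem l (by positivity) (by exact_mod_cast hk)]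
      simpa [hkp] using h
  rw [hany, if_neg hne]

-- B's tail decides the same predicate
theorem alt_tail_eq (pairs : List (List Char)) :
    (if (pairs.foldl (fun d p => d.insert p (d.getD p 0 + 1)) PySem.Dict.empty).values.any
          (fun c => c == (1 : Int)) then (1 : Int) else 0) =
      if pairs.any (fun p => pairs.count p == 1) then 1 else 0 := by
  rw [PySem.Dict.foldl_insert_getD_add_one_eq_counter]
  rw [PySem.Dict.values_eq_map_keys _ (PySem.Dict.nodup_keys_counter _) 0]
  simp only [PySem.Dict.getD_counter, PySem.Dict.keys_counter, List.any_map]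
  congr 1
  simp only [List.any_eq_true, Function.comp]
  rw [eq_iff_iff]
  constructor
  · rintro ⟨x, hx, h⟩; exact ⟨x, (PySem.Set.mem_ofList _ _).1 hx, by simpa using h⟩
  · rintro ⟨x, hx, h⟩; exact ⟨x, (PySem.Set.mem_ofList _ _).2 hx, by simpa using h⟩

-- ===== VERDICT (by name: the statement is the Claim_ definition above) =====
theorem rule_two_spec : Claim_equal_rule_two := by
  intro num _
  simp only [Spec_rule_two, rule_two, rule_two_alt]
  rw [scan_eq_pairs, alt_tail_eq]
  set pairs := (PySem.List.pyRange 2 7 1).foldl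
      (fun acc i =>
        if PySem.List.slice (PySem.Int.toChars num) (some (i - 1)) (some i)
             == PySem.List.slice (PySem.Int.toChars num) (some (i - 2)) (some (i - 1))
        then acc ++ [PySem.List.slice (PySem.Int.toChars num) (some (i - 1)) (some i)] else acc) [] with hp
  by_cases h : pairs = []
  · simp [h]
  · have : (pairs.length == 0) = false := by
      simp [List.length_eq_zero_iff, h]
    rw [this, if_neg (by simp), check_eq pairs h]
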